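-- pv_equiv track=rewrite | github.com/fedorkobak/knowledge | algorithms/algo_sols/task1_5_official_sol.py | slow
-- ===== SOURCE A (Python) =====
-- maxrandval = 1000000
--
-- def getentranceandfloor(flatno, flatsonfloor, floors):
--     floorsbefore = (flatno - 1)//flatsonfloor
--     entrance = floorsbefore//floors + 1
--     floor = floorsbefore % floors + 1
--     return entrance, floor
--
-- def check(k1, m, k2, p2, n2, flatsonfloor):
--     entrance2, floor2 = getentranceandfloor(k2, flatsonfloor, m)
--     if entrance2 == p2 and floor2 == n2:
--         return getentranceandfloor(k1, flatsonfloor, m)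
--     return -1, -1
--
-- def slow(k1, m, k2, p2, n2):
--     ent = -1
--     floor = -1
--     goodflag = False
--
--     for flatsonfloor in range(1, maxrandval + 1):
--         nent, nfloor = check(k1, m, k2, p2, n2, flatsonfloor)
--         if nent != -1:
--             goodflag = True
--             if ent == -1:
--                 ent, floor = nent, nfloor
--             if ent != nent and ent != 0:
--                 ent = 0
--             if floor != nfloor and floor != 0:
--                 floor = 0
--
--     if goodflag:
--        return (ent, floor)
--     else:
--         return (-1, -1)
-- ===== SOURCE B (Python) =====
-- maxrandval = 1000000
--
-- def _stable(n, q):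
--     # largest t (up to maxrandval) with n // t == q, given q == n // f for some f >= 1
--     if q == 0 or q == -1:
--         return maxrandval
--     if q > 0:
--         return n // q
--     return (-n - 1) // (-q - 1)
--
-- def slow(k1, m, k2, p2, n2):
--     ent = -1
--     floor = -1
--     good = False
--     f = 1
--     while f <= maxrandval:
--         q1 = (k1 - 1) // f
--         q2 = (k2 - 1) // f
--         # q1 and q2 are constant for all flats-per-floor values in [f, nxt]
--         nxt = min(_stable(k1 - 1, q1), _stable(k2 - 1, q2), maxrandval)
--         a = q1 // m + 1
--         if q2 // m + 1 == p2 and q2 % m + 1 == n2 and a != -1: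
--             b = q1 % m + 1
--             good = True
--             if ent == -1:
--                 ent, floor = a, b
--             else:
--                 if ent != a and ent != 0:
--                     ent = 0
--                 if floor != b and floor != 0:
--                     floor = 0
--         f = nxt + 1
--     return (ent, floor) if good else (-1, -1)
-- ===== Notes on version B (the rewrite author's own statement) =====
-- stated objective: faster
-- what changed: Instead of testing every flats-per-floor value 1..1000000 individually, B walks the range in divisor blocks on which both quotients (k1-1)//f and (k2-1)//f are constant, applying the (idempotent) aggregation update once per block.
import Mathlib
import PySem

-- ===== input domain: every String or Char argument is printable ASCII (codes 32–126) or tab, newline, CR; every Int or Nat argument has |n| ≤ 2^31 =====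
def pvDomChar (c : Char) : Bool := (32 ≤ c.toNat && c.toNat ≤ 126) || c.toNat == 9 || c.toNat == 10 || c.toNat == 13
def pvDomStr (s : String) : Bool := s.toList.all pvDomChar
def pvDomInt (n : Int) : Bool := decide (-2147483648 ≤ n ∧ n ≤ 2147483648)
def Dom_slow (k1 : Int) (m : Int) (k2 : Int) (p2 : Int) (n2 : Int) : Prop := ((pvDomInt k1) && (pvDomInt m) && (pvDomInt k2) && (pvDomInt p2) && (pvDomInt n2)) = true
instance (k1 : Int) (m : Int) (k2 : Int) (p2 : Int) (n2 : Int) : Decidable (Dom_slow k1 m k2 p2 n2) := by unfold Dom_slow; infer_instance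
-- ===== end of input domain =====

-- B replaces A's scan of all 1000000 flats-per-floor values by a divisor-block walk that visits
-- each distinct pair of quotients ((k1-1)//f, (k2-1)//f) once (objective: faster).

-- ===== PORT A =====
def getentranceandfloor (flatno : Int) (flatsonfloor : Int) (floors : Int) : Int × Int :=
  let floorsbefore := PySem.Int.floordiv (flatno - 1) flatsonfloor
  (PySem.Int.floordiv floorsbefore floors + 1, PySem.Int.mod floorsbefore floors + 1)

def check (k1 : Int) (m : Int) (k2 : Int) (p2 : Int) (n2 : Int) (flatsonfloor : Int) : Int × Int :=
  let ef2 := getentranceandfloor k2 flatsonfloor m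
  if ef2.1 = p2 ∧ ef2.2 = n2 then getentranceandfloor k1 flatsonfloor m
  else (-1, -1)

def slowStep (k1 : Int) (m : Int) (k2 : Int) (p2 : Int) (n2 : Int)
    (s : Int × Int × Bool) (flatsonfloor : Int) : Int × Int × Bool :=
  let nef := check k1 m k2 p2 n2 flatsonfloor
  if nef.1 ≠ -1 then
    let s1 : Int × Int := if s.1 = -1 then (nef.1, nef.2) else (s.1, s.2.1)
    let e2 := if s1.1 ≠ nef.1 ∧ s1.1 ≠ 0 then 0 else s1.1
    let f2 := if s1.2 ≠ nef.2 ∧ s1.2 ≠ 0 then 0 else s1.2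
    (e2, f2, true)
  else s

def slow (k1 : Int) (m : Int) (k2 : Int) (p2 : Int) (n2 : Int) : List Int :=
  let r := (PySem.List.pyRange 1 (1000000 + 1) 1).foldl (slowStep k1 m k2 p2 n2) (-1, -1, false)
  if r.2.2 then [r.1, r.2.1] else [-1, -1]

-- ===== PORT B =====
-- Source B's _stable: largest t ≤ maxrandval with n // t == q, given q == n // f for some f ≥ 1
def stable (n : Int) (q : Int) : Int :=
  if q = 0 ∨ q = -1 then 1000000
  else if 0 < q then PySem.Int.floordiv n q
  else PySem.Int.floordiv (-n - 1) (-q - 1)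

-- `1 ≤ f` is a loop invariant of Source B's while loop, carried as a proof for termination only
theorem stable_ge (n : Int) {f : Int} (hf : 1 ≤ f) (hM : f ≤ 1000000) :
    f ≤ stable n (PySem.Int.floordiv n f) := by
  have h0 : (0:Int) < f := by omega
  have hch := (PySem.Int.floordiv_eq_iff_of_pos (a := n) (b := f)
    (q := PySem.Int.floordiv n f) h0).mp rfl
  set q := PySem.Int.floordiv n f with hq
  unfold stable
  split_ifs with h1 h2
  · exact hM
  · rw [PySem.Int.le_floordiv_iff_mul_le (by omega)]
    nlinarith [hch.1]
  · rw [PySem.Int.le_floordiv_iff_mul_le (by omega)]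
    nlinarith [hch.2]

def altLoop (k1 : Int) (m : Int) (k2 : Int) (p2 : Int) (n2 : Int)
    (f : Int) (ent : Int) (fl : Int) (good : Bool) (hf : 1 ≤ f) : Int × Int × Bool :=
  if h : f ≤ 1000000 then
    have hnxt : f ≤ min (min (stable (k1 - 1) (PySem.Int.floordiv (k1 - 1) f))
        (stable (k2 - 1) (PySem.Int.floordiv (k2 - 1) f))) 1000000 :=
      le_min (le_min (stable_ge (k1 - 1) hf h) (stable_ge (k2 - 1) hf h)) h
    if PySem.Int.floordiv (PySem.Int.floordiv (k2 - 1) f) m + 1 = p2 ∧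
        PySem.Int.mod (PySem.Int.floordiv (k2 - 1) f) m + 1 = n2 ∧
        PySem.Int.floordiv (PySem.Int.floordiv (k1 - 1) f) m + 1 ≠ -1 then
      if ent = -1 then
        altLoop k1 m k2 p2 n2
          (min (min (stable (k1 - 1) (PySem.Int.floordiv (k1 - 1) f))
            (stable (k2 - 1) (PySem.Int.floordiv (k2 - 1) f))) 1000000 + 1)
          (PySem.Int.floordiv (PySem.Int.floordiv (k1 - 1) f) m + 1)
          (PySem.Int.mod (PySem.Int.floordiv (k1 - 1) f) m + 1) true (by omega)
      else
        altLoop k1 m k2 p2 n2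
          (min (min (stable (k1 - 1) (PySem.Int.floordiv (k1 - 1) f))
            (stable (k2 - 1) (PySem.Int.floordiv (k2 - 1) f))) 1000000 + 1)
          (if ent ≠ PySem.Int.floordiv (PySem.Int.floordiv (k1 - 1) f) m + 1 ∧ ent ≠ 0 then 0 else ent)
          (if fl ≠ PySem.Int.mod (PySem.Int.floordiv (k1 - 1) f) m + 1 ∧ fl ≠ 0 then 0 else fl)
          true (by omega)
    else
      altLoop k1 m k2 p2 n2
        (min (min (stable (k1 - 1) (PySem.Int.floordiv (k1 - 1) f))
          (stable (k2 - 1) (PySem.Int.floordiv (k2 - 1) f))) 1000000 + 1)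
        ent fl good (by omega)
  else (ent, fl, good)
termination_by (1000001 - f).toNat
decreasing_by all_goals omega

def slow_alt (k1 : Int) (m : Int) (k2 : Int) (p2 : Int) (n2 : Int) : List Int :=
  let r := altLoop k1 m k2 p2 n2 1 (-1) (-1) false (by norm_num)
  if r.2.2 then [r.1, r.2.1] else [-1, -1]

-- ===== PRECONDITION & SPEC =====
-- Pre_ excludes m = 0, on which Python A raises ZeroDivisionError ('floorsbefore // floors').
def Pre_slow (k1 : Int) (m : Int) (k2 : Int) (p2 : Int) (n2 : Int) : Prop := m ≠ 0
instance (k1 : Int) (m : Int) (k2 : Int) (p2 : Int) (n2 : Int) : Decidable (Pre_slow k1 m k2 p2 n2) := by unfold Pre_slow; infer_instance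
def pvWitness_slow : Int × Int × Int × Int × Int := (7, 3, 10, 1, 2)

def Spec_slow (k1 : Int) (m : Int) (k2 : Int) (p2 : Int) (n2 : Int) (out : List Int) : Prop := out = slow_alt k1 m k2 p2 n2
instance (k1 : Int) (m : Int) (k2 : Int) (p2 : Int) (n2 : Int) (out : List Int) : Decidable (Spec_slow k1 m k2 p2 n2 out) := by unfold Spec_slow; infer_instance

-- ===== CLAIM (what is proved, stated in full; the proofs are below) =====
def Claim_equal_slow : Prop := ∀ (k1 : Int) (m : Int) (k2 : Int) (p2 : Int) (n2 : Int), Dom_slow k1 m k2 p2 n2 → Pre_slow k1 m k2 p2 n2 → Spec_slow k1 m k2 p2 n2 (slow k1 m k2 p2 n2)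

-- ===== LEMMAS AND PROOFS =====

theorem fdiv_const (n : Int) {f t : Int} (hf : 1 ≤ f) (hft : f ≤ t)
    (ht : t ≤ stable n (PySem.Int.floordiv n f)) :
    PySem.Int.floordiv n t = PySem.Int.floordiv n f := by
  have h0 : (0:Int) < f := by omega
  have h0t : (0:Int) < t := by omega
  have hch := (PySem.Int.floordiv_eq_iff_of_pos (a := n) (b := f)
    (q := PySem.Int.floordiv n f) h0).mp rfl
  set q := PySem.Int.floordiv n f with hq
  rw [PySem.Int.floordiv_eq_iff_of_pos h0t]
  unfold stable at ht
  split_ifs at ht with h1 h2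
  · rcases h1 with h1 | h1 <;>
      constructor <;> nlinarith [hch.1, hch.2]
  · have hd := (PySem.Int.le_floordiv_iff_mul_le (a := n) (b := q) (q := t) (by omega)).mp ht
    constructor <;> nlinarith [hch.1, hch.2]
  · have hd := (PySem.Int.le_floordiv_iff_mul_le (a := -n - 1) (b := -q - 1) (q := t) (by omega)).mp ht
    constructor <;> nlinarith [hch.1, hch.2]


-- the state update performed on every matching flats-per-floor value (common to both ports)
def matchUpd (a : Int) (b : Int) (s : Int × Int × Bool) : Int × Int × Bool :=
  if s.1 = -1 then (a, b, true)
  else ((if s.1 ≠ a ∧ s.1 ≠ 0 then 0 else s.1), (if s.2.1 ≠ b ∧ s.2.1 ≠ 0 then 0 else s.2.1), true)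

theorem matchUpd_idem (a b : Int) (s : Int × Int × Bool) :
    matchUpd a b (matchUpd a b s) = matchUpd a b s := by
  obtain ⟨e, fl, g⟩ := s
  unfold matchUpd
  by_cases he : e = -1 <;> by_cases ha : a = -1 <;>
    simp_all <;> split_ifs <;> simp_all <;> omega

-- A's step, rewritten through the quotients q1 = (k1-1)//f, q2 = (k2-1)//f
theorem slowStep_eq (k1 m k2 p2 n2 f : Int) (s : Int × Int × Bool) :
    slowStep k1 m k2 p2 n2 s f =
      (if PySem.Int.floordiv (PySem.Int.floordiv (k2 - 1) f) m + 1 = p2 ∧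
          PySem.Int.mod (PySem.Int.floordiv (k2 - 1) f) m + 1 = n2 ∧
          PySem.Int.floordiv (PySem.Int.floordiv (k1 - 1) f) m + 1 ≠ -1
        then matchUpd (PySem.Int.floordiv (PySem.Int.floordiv (k1 - 1) f) m + 1)
               (PySem.Int.mod (PySem.Int.floordiv (k1 - 1) f) m + 1) s
        else s) := by
  obtain ⟨e, fl, g⟩ := s
  unfold slowStep check getentranceandfloor matchUpd
  by_cases h1 : PySem.Int.floordiv (PySem.Int.floordiv (k2 - 1) f) m + 1 = p2 ∧
      PySem.Int.mod (PySem.Int.floordiv (k2 - 1) f) m + 1 = n2 <;>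
    by_cases h2 : PySem.Int.floordiv (PySem.Int.floordiv (k1 - 1) f) m + 1 = -1 <;>
      by_cases he : e = -1 <;>
        simp_all <;> (try split_ifs) <;> simp_all

theorem foldl_eq_iterate {α β : Type} (step : α → β → α) (u : α → α) :
    ∀ (l : List β), (∀ s x, x ∈ l → step s x = u s) → ∀ s, l.foldl step s = u^[l.length] s := by
  intro l
  induction l with
  | nil => intro _ s; rfl
  | cons x xs ih =>
      intro h s
      simp only [List.foldl_cons, List.length_cons, Function.iterate_succ_apply]
      rw [h s x (by simp), ih (fun s' y hy => h s' y (by simp [hy]))]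

theorem iterate_idem {α : Type} (u : α → α) (hu : ∀ s, u (u s) = u s) :
    ∀ (n : ℕ), 1 ≤ n → ∀ s, u^[n] s = u s := by
  intro n
  induction n with
  | zero => omega
  | succ k ih =>
      intro _ s
      rcases Nat.eq_zero_or_pos k with hk | hk
      · subst hk; rfl
      · rw [Function.iterate_succ_apply, ih hk, hu]

theorem altLoop_eq (k1 m k2 p2 n2 : Int) :
    ∀ (N : ℕ) (f : Int) (hf : 1 ≤ f), (1000001 - f).toNat ≤ N →
      ∀ (ent fl : Int) (good : Bool),
        altLoop k1 m k2 p2 n2 f ent fl good hf =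
          (PySem.List.pyRange f 1000001 1).foldl (slowStep k1 m k2 p2 n2) (ent, fl, good) := by
  intro N
  induction N with
  | zero =>
      intro f hf hN ent fl good
      have hM : ¬ f ≤ 1000000 := by omega
      rw [altLoop, PySem.List.pyRange_one_eq_nil (by omega)]
      simp [hM]
  | succ N ih =>
      intro f hf hN ent fl good
      by_cases hM : f ≤ 1000000
      · rw [altLoop]
        set q1 := PySem.Int.floordiv (k1 - 1) f with hq1
        set q2 := PySem.Int.floordiv (k2 - 1) f with hq2
        set nxt := min (min (stable (k1 - 1) q1) (stable (k2 - 1) q2)) 1000000 with hnxt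
        have hfn : f ≤ nxt :=
          le_min (le_min (stable_ge (k1 - 1) hf hM) (stable_ge (k2 - 1) hf hM)) hM
        have hnM : nxt ≤ 1000000 := min_le_right _ _
        -- every x in [f, nxt] has the same pair of quotients
        have hsame : ∀ x, x ∈ PySem.List.pyRange f (nxt + 1) 1 →
            PySem.Int.floordiv (k1 - 1) x = q1 ∧ PySem.Int.floordiv (k2 - 1) x = q2 := by
          intro x hx
          rw [PySem.List.mem_pyRange_one] at hx
          constructor
          · exact fdiv_const (k1 - 1) hf hx.1 (by rw [← hq1]; have := min_le_left (min (stable (k1 - 1) q1) (stable (k2 - 1) q2)) 1000000; have := min_le_left (stable (k1 - 1) q1) (stable (k2 - 1) q2); omega)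
          · exact fdiv_const (k2 - 1) hf hx.1 (by rw [← hq2]; have := min_le_left (min (stable (k1 - 1) q1) (stable (k2 - 1) q2)) 1000000; have := min_le_right (stable (k1 - 1) q1) (stable (k2 - 1) q2); omega)
        have hsplit : PySem.List.pyRange f 1000001 1 =
            PySem.List.pyRange f (nxt + 1) 1 ++ PySem.List.pyRange (nxt + 1) 1000001 1 :=
          PySem.List.pyRange_one_append f (nxt + 1) 1000001 (by omega) (by omega)
        have hlen : 1 ≤ (PySem.List.pyRange f (nxt + 1) 1).length := by
          rw [PySem.List.length_pyRange_one]; omega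
        by_cases hc : PySem.Int.floordiv q2 m + 1 = p2 ∧
            PySem.Int.mod q2 m + 1 = n2 ∧ PySem.Int.floordiv q1 m + 1 ≠ -1
        · -- matching block: the step is matchUpd a b on the whole block, which is idempotent
          have hstep : ∀ (s : Int × Int × Bool) x, x ∈ PySem.List.pyRange f (nxt + 1) 1 →
              slowStep k1 m k2 p2 n2 s x =
                matchUpd (PySem.Int.floordiv q1 m + 1) (PySem.Int.mod q1 m + 1) s := by
            intro s x hx
            obtain ⟨e1, e2⟩ := hsame x hx
            rw [slowStep_eq, e1, e2, if_pos hc]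
          rw [hsplit, List.foldl_append,
            foldl_eq_iterate _ _ _ hstep (ent, fl, good),
            iterate_idem _ (matchUpd_idem _ _) _ hlen]
          simp only [matchUpd]
          by_cases he : ent = -1
          · simp only [he, dif_pos hM]
            simp only [← hq1, ← hq2, ← hnxt, if_pos hc]
            exact ih (nxt + 1) (by omega) (by omega) _ _ _
          · simp only [if_neg he, dif_pos hM]
            simp only [← hq1, ← hq2, ← hnxt, if_pos hc]
            exact ih (nxt + 1) (by omega) (by omega) _ _ _
        · -- non-matching block: the step is the identity on the whole block
          have hstep : ∀ (s : Int × Int × Bool) x, x ∈ PySem.List.pyRange f (nxt + 1) 1 →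
              slowStep k1 m k2 p2 n2 s x = s := by
            intro s x hx
            obtain ⟨e1, e2⟩ := hsame x hx
            rw [slowStep_eq, e1, e2, if_neg hc]
          rw [hsplit, List.foldl_append,
            foldl_eq_iterate _ id _ hstep (ent, fl, good), Function.iterate_id, id]
          simp only [dif_pos hM, ← hq1, ← hq2, ← hnxt, if_neg hc]
          exact ih (nxt + 1) (by omega) (by omega) _ _ _
      · rw [altLoop, PySem.List.pyRange_one_eq_nil (by omega)]
        simp [hM]

-- ===== VERDICT (by name: the statement is the Claim_ definition above) =====
theorem slow_spec : Claim_equal_slow := by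
  intro k1 m k2 p2 n2 _ _
  unfold Spec_slow slow slow_alt
  rw [altLoop_eq k1 m k2 p2 n2 1000000 1 (by norm_num) (by norm_num)]
  norm_num
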